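-- pv_equiv track=rewrite | github.com/falonge/CMSC-201-Projects | Projects/proj3/proj3.py | fill_board
-- ===== SOURCE A (Python) =====
-- def fill_board(board_list):
--     for i in range(len(board_list)):
--         for j in range(len(board_list[i])):
--             if j != 0:
--                 if board_list[i][j] == "+" and board_list[i][j-1] == "O":
--                     board_list[i][j] = "O"
--                 elif board_list[i][j] == "+" and board_list[i][j-1] == "X":
--                     board_list[i][j] = "X"
--     for i in range(len(board_list)):
--         for j in range(len(board_list[i])):
--             if j != len(board_list[i])-1:
--                 if board_list[i][j] == "+" and board_list[i][j+1] == "O":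
--                     board_list[i][j] = "O"
--                     board_list = fill_board(board_list)
--                 elif board_list[i][j] == "+" and board_list[i][j+1] == "X":
--                     board_list[i][j] = "X"
--                     board_list = fill_board(board_list)
--     return board_list
-- ===== SOURCE B (Python) =====
-- # B: one left-to-right and one right-to-left sweep per row, instead of A's
-- # recursive full re-scans. Return-value equivalence only: A
-- # fills the given row lists in place, B builds fresh rows.
-- def _sweep(row):
--     out = []
--     prev = ""
--     for c in row:
--         if c == "+" and prev in ("O", "X"):
--             c = prev
--         out.append(c)
--         prev = c
--     return out
--
-- def fill_board(board_list):
--     return [_sweep(_sweep(row)[::-1])[::-1] for row in board_list]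
-- ===== Notes on version B (the rewrite author's own statement) =====
-- stated objective: alternative
-- what changed: Replaces A's recursive whole-board re-scans (restarting on every fill) with two linear sweeps per row: fill '+' from the updated left neighbor, then from the updated right neighbor; measured ~1.4x on generated inputs, not confirmed as faster.
import Mathlib
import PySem

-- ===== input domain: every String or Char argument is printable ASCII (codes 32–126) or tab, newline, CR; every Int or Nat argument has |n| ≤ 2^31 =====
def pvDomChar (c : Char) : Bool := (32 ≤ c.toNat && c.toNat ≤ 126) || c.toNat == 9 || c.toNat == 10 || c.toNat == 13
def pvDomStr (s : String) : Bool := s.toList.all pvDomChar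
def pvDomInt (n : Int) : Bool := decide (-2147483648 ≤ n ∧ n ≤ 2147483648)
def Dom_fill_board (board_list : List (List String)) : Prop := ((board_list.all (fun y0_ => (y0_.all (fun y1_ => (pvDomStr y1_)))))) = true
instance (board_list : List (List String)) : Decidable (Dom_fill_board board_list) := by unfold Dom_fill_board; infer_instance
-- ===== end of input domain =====

-- B replaces A's recursive whole-board re-scans by two linear sweeps per row; equivalence is about
-- the RETURN value only (the Python A fills the caller's row lists in place, B builds fresh rows).

-- ===== PORT A =====
-- first double loop of A: fill "+" cells from the (already updated) left neighbour, by index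
def pass1Row (row : List String) : List String :=
  (List.range row.length).foldl (fun r j =>
    if j ≠ 0 then
      if r.getD j "" = "+" ∧ r.getD (j - 1) "" = "O" then r.set j "O"
      else if r.getD j "" = "+" ∧ r.getD (j - 1) "" = "X" then r.set j "X"
      else r
    else r) row

def pass1 (b : List (List String)) : List (List String) := b.map pass1Row

-- the (i, j) sequence of A's second double loop (row lengths never change)
def allPairs (b : List (List String)) : List (Nat × Nat) :=
  (List.range b.length).flatMap (fun i =>
    (List.range (b.getD i []).length).map (fun j => (i, j)))

def getCell (b : List (List String)) (i j : Nat) : String := (b.getD i []).getD j ""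

def setCell (b : List (List String)) (i j : Nat) (v : String) : List (List String) :=
  b.set i ((b.getD i []).set j v)

def plusCountRow (r : List String) : Nat := r.countP (fun c => c = "+")

def plusTotal (b : List (List String)) : Nat := (b.map plusCountRow).sum

-- second double loop with the recursive call; fuel only makes the recursion total
-- (each recursive call happens right after a "+" was overwritten, so plusTotal + 1 suffices)
mutual
def fillA : Nat → List (List String) → List (List String)
  | 0, b => b
  | f + 1, b =>
    let b1 := pass1 b
    loopA f b1 (allPairs b1)
termination_by f _ => ((f : Nat), 0)

def loopA : Nat → List (List String) → List (Nat × Nat) → List (List String)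
  | _, b, [] => b
  | f, b, (i, j) :: ps =>
    if j ≠ (b.getD i []).length - 1 then
      if getCell b i j = "+" ∧ getCell b i (j + 1) = "O" then
        loopA f (fillA f (setCell b i j "O")) ps
      else if getCell b i j = "+" ∧ getCell b i (j + 1) = "X" then
        loopA f (fillA f (setCell b i j "X")) ps
      else loopA f b ps
    else loopA f b ps
termination_by f _ ps => ((f : Nat), ps.length + 1)
end

def fill_board (board_list : List (List String)) : List (List String) :=
  fillA (plusTotal board_list + 1) board_list

-- ===== PORT B =====
-- one sequential sweep: fill "+" from the (already updated) previous cell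
def sweep : String → List String → List String
  | _, [] => []
  | prev, c :: t =>
    let c' := if c = "+" ∧ (prev = "O" ∨ prev = "X") then prev else c
    c' :: sweep c' t

def fill_board_alt (board_list : List (List String)) : List (List String) :=
  board_list.map (fun row => (sweep "" ((sweep "" row).reverse)).reverse)

-- ===== PRECONDITION & SPEC =====
def Spec_fill_board (board_list : List (List String)) (out : List (List String)) : Prop := out = fill_board_alt board_list
instance (board_list : List (List String)) (out : List (List String)) : Decidable (Spec_fill_board board_list out) := by unfold Spec_fill_board; infer_instance

-- ===== CLAIM (what is proved, stated in full; the proofs are below) =====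
def Claim_equal_fill_board : Prop := ∀ (board_list : List (List String)), Dom_fill_board board_list → Spec_fill_board board_list (fill_board board_list)

-- ===== LEMMAS AND PROOFS =====

def fillc (prev c : String) : String := if c = "+" ∧ (prev = "O" ∨ prev = "X") then prev else c

def okL (a b : String) : Prop := ¬(b = "+" ∧ (a = "O" ∨ a = "X"))

def okR (a b : String) : Prop := ¬(a = "+" ∧ (b = "O" ∨ b = "X"))

def carry (p : String) (u : List String) : String := (sweep p u).getLastD p

theorem sweep_cons (p c : String) (t : List String) :
    sweep p (c :: t) = fillc p c :: sweep (fillc p c) t := rfl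

theorem fillc_eq_prev_or_self (p c : String) : fillc p c = p ∨ fillc p c = c := by
  unfold fillc; split <;> simp

theorem fillc_plus {p c : String} (h : fillc p c = "+") : c = "+" := by
  unfold fillc at h; split at h
  · rename_i hc; exact hc.1
  · exact h

theorem fillc_ox_plus {p c : String} (h : fillc p c = "+") (hp : p = "O" ∨ p = "X") :
    False := by
  unfold fillc at h
  rw [if_pos ⟨fillc_plus h, hp⟩] at h
  rcases hp with h' | h' <;> simp_all

theorem okL_fillc (p c : String) : okL p (fillc p c) := by
  intro ⟨h1, h2⟩
  exact fillc_ox_plus h1 h2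

theorem fillc_of_plus (c : String) : fillc "+" c = c := by
  unfold fillc; split <;> simp_all

theorem carry_cons (p a : String) (t : List String) :
    carry p (a :: t) = carry (fillc p a) t := by
  unfold carry
  rw [sweep_cons, List.getLastD_cons]

theorem sweep_append (p : String) (u v : List String) :
    sweep p (u ++ v) = sweep p u ++ sweep (carry p u) v := by
  induction u generalizing p with
  | nil => simp [carry, sweep]
  | cons a t ih =>
    rw [List.cons_append, sweep_cons, sweep_cons, ih, carry_cons, List.cons_append]

theorem chainL_sweep (p : String) (r : List String) : List.IsChain okL (sweep p r) := by
  induction r generalizing p with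
  | nil => exact .nil
  | cons a t ih =>
    rw [sweep_cons, List.isChain_cons]
    refine ⟨?_, ih _⟩
    intro y hy
    cases t with
    | nil => simp [sweep] at hy
    | cons c u =>
      rw [sweep_cons, List.head?_cons, Option.mem_some_iff] at hy
      subst hy
      exact okL_fillc _ _

theorem chainR_sweep (p : String) (u : List String) (h : List.IsChain okR u) :
    List.IsChain okR (sweep p u) := by
  induction u generalizing p with
  | nil => exact .nil
  | cons a t ih =>
    rw [List.isChain_cons] at h
    rw [sweep_cons, List.isChain_cons]
    refine ⟨?_, ih _ h.2⟩
    intro y hy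
    cases t with
    | nil => simp [sweep] at hy
    | cons c u' =>
      rw [sweep_cons, List.head?_cons, Option.mem_some_iff] at hy
      subst hy
      intro ⟨h1, h2⟩
      rw [h1, fillc_of_plus] at h2
      exact h.1 c (by simp) ⟨fillc_plus h1, h2⟩

theorem fillc_id {p c : String} (h : okL p c) : fillc p c = c := by
  unfold fillc; split
  · rename_i hc; exact absurd hc h
  · rfl

theorem sweep_id (p : String) (r : List String) (h : List.IsChain okL r)
    (hp : ∀ a ∈ r.head?, okL p a) : sweep p r = r := by
  induction r generalizing p with
  | nil => rfl
  | cons a t ih =>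
    rw [List.isChain_cons] at h
    have ha : fillc p a = a := fillc_id (hp a (by simp))
    rw [sweep_cons, ha, ih a h.2 h.1]

theorem sweep_empty_id (r : List String) (h : List.IsChain okL r) : sweep "" r = r := by
  apply sweep_id _ _ h
  intro a _
  rintro ⟨-, h' | h'⟩ <;> simp at h'

def rowB (r : List String) : List String := (sweep "" ((sweep "" r).reverse)).reverse

theorem flipLR {l : List String} : l.reverse.IsChain okL ↔ l.IsChain okR := by
  rw [List.isChain_reverse]
  constructor <;> exact fun h => h.imp (fun _ _ hab => hab)

theorem flipRL {l : List String} : l.reverse.IsChain okR ↔ l.IsChain okL := by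
  rw [List.isChain_reverse]
  constructor <;> exact fun h => h.imp (fun _ _ hab => hab)

theorem rowB_stable (r : List String) :
    List.IsChain okL (rowB r) ∧ List.IsChain okR (rowB r) := by
  unfold rowB
  constructor
  · exact flipLR.mpr (chainR_sweep _ _ (flipLR.mp (by rw [List.reverse_reverse]; exact chainL_sweep _ _)))
  · exact flipRL.mpr (chainL_sweep _ _)

theorem rowB_id (r : List String) (h1 : List.IsChain okL r) (h2 : List.IsChain okR r) :
    rowB r = r := by
  unfold rowB
  rw [sweep_empty_id r h1, sweep_empty_id _ (flipLR.mpr h2), List.reverse_reverse]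

theorem rowB_sweep (r : List String) : rowB (sweep "" r) = rowB r := by
  unfold rowB
  rw [sweep_empty_id _ (chainL_sweep _ _)]

theorem rowB_fill_right (l : String) (hl : l = "O" ∨ l = "X") (u v : List String)
    (h : List.IsChain okL (u ++ "+" :: l :: v)) :
    rowB (u ++ l :: l :: v) = rowB (u ++ "+" :: l :: v) := by
  have hlp : ¬ l = "+" := by rcases hl with h' | h' <;> simp [h']
  -- the filled row is still left-stable
  have h2 : List.IsChain okL (u ++ l :: l :: v) := by
    rw [List.isChain_append] at h ⊢
    refine ⟨h.1, ?_, ?_⟩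
    · have := h.2.1
      rw [List.isChain_cons] at this ⊢
      refine ⟨fun y hy => ?_, this.2⟩
      simp only [List.head?_cons, Option.mem_some_iff] at hy
      subst hy
      exact fun hc => hlp hc.1
    · intro x hx y hy
      simp only [List.head?_cons, Option.mem_some_iff] at hy
      subst hy
      exact fun hc => hlp hc.1
  rw [rowB, rowB, sweep_empty_id _ h, sweep_empty_id _ h2]
  congr 1
  simp only [List.reverse_append, List.reverse_cons]
  have hfl : ∀ c : String, fillc c l = l := by
    intro c; unfold fillc; split
    · rename_i hc; exact absurd hc.1 hlp
    · rfl
  have hplus : fillc l "+" = l := by unfold fillc; rw [if_pos ⟨rfl, hl⟩]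
  have e1 : v.reverse ++ [l] ++ [l] ++ u.reverse = v.reverse ++ (l :: l :: u.reverse) := by simp
  have e2 : v.reverse ++ [l] ++ ["+"] ++ u.reverse = v.reverse ++ (l :: "+" :: u.reverse) := by simp
  rw [e1, e2, sweep_append, sweep_append]
  simp [sweep_cons, hfl, hplus]

theorem sweep_length (p : String) (r : List String) : (sweep p r).length = r.length := by
  induction r generalizing p with
  | nil => rfl
  | cons a t ih => simp [sweep_cons, ih]

theorem getD_last {α : Type} (l : List α) (d : α) :
    l.getD (l.length - 1) d = l.getLastD d := by
  rw [List.getD_eq_getElem?_getD, List.getLastD_eq_getLast?, List.getLast?_eq_getElem?]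

theorem pass1_aux (r : List String) (k : Nat) (hk : k ≤ r.length) :
    (List.range k).foldl (fun r j =>
      if j ≠ 0 then
        if r.getD j "" = "+" ∧ r.getD (j - 1) "" = "O" then r.set j "O"
        else if r.getD j "" = "+" ∧ r.getD (j - 1) "" = "X" then r.set j "X"
        else r
      else r) r = sweep "" (r.take k) ++ r.drop k := by
  induction k with
  | zero => simp [sweep]
  | succ k ih =>
    have hk' : k < r.length := hk
    rw [List.range_succ, List.foldl_append, ih (Nat.le_of_lt hk'), List.foldl_cons, List.foldl_nil]
    set s := sweep "" (r.take k) with hs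
    have hsl : s.length = k := by
      rw [hs, sweep_length, List.length_take]
      omega
    have hdrop : r.drop k = r[k] :: r.drop (k + 1) := List.drop_eq_getElem_cons hk'
    have htake : sweep "" (r.take (k + 1)) = s ++ [fillc (carry "" (r.take k)) r[k]] := by
      rw [List.take_add_one, List.getElem?_eq_getElem hk']
      show sweep "" (r.take k ++ [r[k]]) = _
      rw [sweep_append]
      rfl
    have hget : (s ++ r.drop k).getD k "" = r[k] := by
      rw [hdrop, List.getD_append_right s _ "" k (by omega)]
      simp [hsl, List.getElem?_eq_getElem hk']
    have hcar : carry "" (r.take k) = s.getLastD "" := rfl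
    have hgetp : k ≠ 0 → (s ++ r.drop k).getD (k - 1) "" = s.getLastD "" := by
      intro h0
      have := getD_last s ""
      rw [List.getD_append _ _ _ _ (by omega), ← this, hsl]
    have hset : ∀ v, (s ++ r.drop k).set k v = s ++ v :: r.drop (k + 1) := by
      intro v
      rw [List.set_append_right _ _ (by omega : s.length ≤ k)]
      have h0 : k - s.length = 0 := by omega
      rw [h0, hdrop]
      rfl
    by_cases h0 : k = 0
    · subst h0
      simp only [ne_eq, not_true_eq_false, if_false, ite_false]
      rw [htake, hdrop]
      have : fillc (carry "" (r.take 0)) r[0] = r[0] := by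
        show fillc "" r[0] = r[0]
        apply fillc_id
        rintro ⟨-, h' | h'⟩ <;> simp at h'
      rw [this]
      simp [hdrop]
    · simp only [h0, ne_eq, not_false_eq_true, if_true, if_pos]
      rw [htake, hcar]
      by_cases c1 : (s ++ r.drop k).getD k "" = "+" ∧ (s ++ r.drop k).getD (k - 1) "" = "O"
      · rw [if_pos c1, hset]
        have : fillc (s.getLastD "") r[k] = "O" := by
          unfold fillc
          rw [if_pos ⟨by rw [← hget]; exact c1.1, by rw [← hgetp h0]; exact Or.inl c1.2⟩,
            ← hgetp h0, c1.2]
        rw [this]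
        simp
      · rw [if_neg c1]
        by_cases c2 : (s ++ r.drop k).getD k "" = "+" ∧ (s ++ r.drop k).getD (k - 1) "" = "X"
        · rw [if_pos c2, hset]
          have : fillc (s.getLastD "") r[k] = "X" := by
            unfold fillc
            rw [if_pos ⟨by rw [← hget]; exact c2.1, by rw [← hgetp h0]; exact Or.inr c2.2⟩,
              ← hgetp h0, c2.2]
          rw [this]
          simp
        · rw [if_neg c2]
          have : fillc (s.getLastD "") r[k] = r[k] := by
            apply fillc_id
            rw [← hget, ← hgetp h0]
            rintro ⟨ha, hb | hb⟩
            · exact c1 ⟨ha, hb⟩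
            · exact c2 ⟨ha, hb⟩
          rw [this, hdrop]
          simp

theorem pass1Row_sweep (r : List String) : pass1Row r = sweep "" r := by
  unfold pass1Row
  rw [pass1_aux r r.length (Nat.le_refl _)]
  simp

theorem map_id_of {α : Type} (f : α → α) (l : List α) (h : ∀ x ∈ l, f x = x) :
    l.map f = l := by
  induction l with
  | nil => rfl
  | cons a t ih => simp [h a (by simp), ih (fun x hx => h x (by simp [hx]))]

def Trig (b : List (List String)) (q : Nat × Nat) : Prop :=
  q.2 ≠ (b.getD q.1 []).length - 1 ∧ getCell b q.1 q.2 = "+" ∧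
    (getCell b q.1 (q.2 + 1) = "O" ∨ getCell b q.1 (q.2 + 1) = "X")

theorem getCell_lt {b : List (List String)} {i j : Nat} (h : getCell b i j = "+") :
    i < b.length ∧ j < (b.getD i []).length := by
  have hi : i < b.length := by
    by_contra hi
    rw [getCell, List.getD_eq_default b [] (by omega)] at h
    simp [List.getD] at h
  refine ⟨hi, ?_⟩
  by_contra hj
  rw [getCell, List.getD_eq_default _ "" (by omega)] at h
  simp at h

theorem getCell_eq {b : List (List String)} {i j : Nat} (hi : i < b.length)
    (hj : j < b[i].length) : getCell b i j = b[i][j] := by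
  rw [getCell, List.getD_eq_getElem b [] hi, List.getD_eq_getElem _ "" hj]

theorem mem_allPairs {b : List (List String)} {i j : Nat} (hi : i < b.length)
    (hj : j < (b.getD i []).length) : (i, j) ∈ allPairs b := by
  simp only [allPairs, List.mem_flatMap, List.mem_range, List.mem_map]
  exact ⟨i, hi, j, hj, rfl⟩

theorem okR_of_noTrig {b : List (List String)} {r : List String}
    (hmem : ∀ q ∈ allPairs b, ¬ Trig b q) (hr : r ∈ b) : List.IsChain okR r := by
  rw [List.mem_iff_getElem] at hr
  obtain ⟨i, hi, rfl⟩ := hr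
  rw [List.isChain_iff_getElem]
  intro jj hjj
  have hg : (b.getD i []) = b[i] := List.getD_eq_getElem b [] hi
  have hmem' := hmem (i, jj) (mem_allPairs hi (by rw [hg]; omega))
  rw [Trig] at hmem'
  push_neg at hmem'
  simp only [hg] at hmem'
  intro ⟨h1, h2⟩
  have hne : jj ≠ b[i].length - 1 := by omega
  have e1 : getCell b i jj = b[i][jj] := getCell_eq hi (by omega)
  have e2 : getCell b i (jj + 1) = b[i][jj + 1] := getCell_eq hi (by omega)
  have hp := hmem' hne (by rw [e1]; exact h1)
  rw [e2] at hp
  rcases h2 with h2 | h2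
  · exact hp.1 h2
  · exact hp.2 h2

theorem notTrig_of_stable {b : List (List String)} {i j : Nat}
    (h : ∀ r ∈ b, List.IsChain okR r) (hj : j ≠ (b.getD i []).length - 1)
    (hplus : getCell b i j = "+") :
    ¬ (getCell b i (j + 1) = "O" ∨ getCell b i (j + 1) = "X") := by
  obtain ⟨hi, hjl⟩ := getCell_lt hplus
  have hg : b.getD i [] = b[i] := List.getD_eq_getElem b [] hi
  have hj1 : j + 1 < b[i].length := by rw [hg] at hjl hj; omega
  have hok := (List.isChain_iff_getElem.mp (h b[i] (List.getElem_mem hi))) j hj1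
  rw [getCell_eq hi (by omega)] at hplus
  intro hor
  rw [getCell_eq hi hj1] at hor
  exact hok ⟨hplus, hor⟩

theorem loopA_stable (f : Nat) (b : List (List String)) (ps : List (Nat × Nat))
    (h : ∀ r ∈ b, List.IsChain okL r ∧ List.IsChain okR r) : loopA f b ps = b := by
  induction ps with
  | nil => rw [loopA]
  | cons q ps ih =>
    obtain ⟨i, j⟩ := q
    rw [loopA]
    by_cases hj : j ≠ (b.getD i []).length - 1
    · rw [if_pos hj]
      by_cases hplus : getCell b i j = "+"
      · have hno := notTrig_of_stable (fun r hr => (h r hr).2) hj hplus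
        rw [if_neg (fun hc => hno (Or.inl hc.2)), if_neg (fun hc => hno (Or.inr hc.2))]
        exact ih
      · rw [if_neg (fun hc => hplus hc.1), if_neg (fun hc => hplus hc.1)]
        exact ih
    · rw [if_neg hj]
      exact ih

theorem sum_set_lt (l : List Nat) (i : Nat) (a : Nat) (hi : i < l.length) (ha : a < l[i]) :
    (l.set i a).sum < l.sum := by
  induction l generalizing i with
  | nil => simp at hi
  | cons x t ih =>
    cases i with
    | zero => simp at ha ⊢; omega
    | succ i =>
      simp only [List.set_cons_succ, List.sum_cons]
      have := ih i (by simpa using hi) (by simpa using ha)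
      omega

theorem countP_set_plus (r : List String) (j : Nat) (l : String) (hj : j < r.length)
    (hp : r[j] = "+") (hl : l = "O" ∨ l = "X") :
    (r.set j l).countP (fun c => decide (c = "+")) < r.countP (fun c => decide (c = "+")) := by
  induction r generalizing j with
  | nil => simp at hj
  | cons x t ih =>
    cases j with
    | zero =>
      simp only [List.getElem_cons_zero] at hp
      subst hp
      rcases hl with h | h <;> subst h <;> simp [List.countP_cons]
    | succ j =>
      simp only [List.set_cons_succ, List.countP_cons]
      have := ih j (by simpa using hj) (by simpa using hp)
      omega

theorem plusTotal_set_lt {b : List (List String)} {i j : Nat} {l : String}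
    (hplus : getCell b i j = "+") (hl : l = "O" ∨ l = "X") :
    plusTotal (setCell b i j l) < plusTotal b := by
  obtain ⟨hi, hj⟩ := getCell_lt hplus
  have hg : b.getD i [] = b[i] := List.getD_eq_getElem b [] hi
  rw [hg] at hj
  rw [setCell, hg, plusTotal, plusTotal, List.map_set]
  apply sum_set_lt _ i _ (by simpa using hi)
  rw [List.getElem_map]
  unfold plusCountRow
  apply countP_set_plus _ j _ hj _ hl
  rw [← getCell_eq hi hj]
  exact hplus

theorem mapB_setCell {b : List (List String)} {i j : Nat} {l : String}
    (hL : List.IsChain okL (b.getD i [])) (hplus : getCell b i j = "+")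
    (hnext : getCell b i (j + 1) = l) (hl : l = "O" ∨ l = "X")
    (hj : j ≠ (b.getD i []).length - 1) :
    (setCell b i j l).map rowB = b.map rowB := by
  obtain ⟨hi, hjl⟩ := getCell_lt hplus
  have hg : b.getD i [] = b[i] := List.getD_eq_getElem b [] hi
  rw [hg] at hjl hj hL
  have hj1 : j + 1 < b[i].length := by omega
  have hp' : b[i][j] = "+" := by rw [← getCell_eq hi hjl]; exact hplus
  have hn' : b[i][j + 1] = l := by rw [← getCell_eq hi hj1]; exact hnext
  have e : b[i] = b[i].take j ++ "+" :: l :: b[i].drop (j + 2) := by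
    conv_lhs => rw [← List.take_append_drop j b[i], List.drop_eq_getElem_cons hjl,
      List.drop_eq_getElem_cons hj1]
    rw [hp', hn']
  have eset : b[i].set j l = b[i].take j ++ l :: l :: b[i].drop (j + 2) := by
    rw [List.set_eq_take_cons_drop l hjl, List.drop_eq_getElem_cons hj1, hn']
  have hrowB : rowB (b[i].set j l) = rowB b[i] := by
    rw [eset]
    conv_rhs => rw [e]
    exact rowB_fill_right l hl _ _ (e ▸ hL)
  rw [setCell, hg, List.map_set, hrowB]
  have : rowB b[i] = (b.map rowB)[i]'(by simpa using hi) := by rw [List.getElem_map]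
  rw [this, List.set_getElem_self]

theorem la_main (f : Nat) (ps2 : List (Nat × Nat)) : ∀ (b : List (List String)) (ps1 : List (Nat × Nat)),
    allPairs b = ps1 ++ ps2 →
    (∀ r ∈ b, List.IsChain okL r) →
    (∀ q ∈ ps1, ¬ Trig b q) →
    plusTotal b ≤ f →
    (∀ b', plusTotal b' < f → fillA f b' = b'.map rowB) →
    loopA f b ps2 = b.map rowB := by
  induction ps2 with
  | nil =>
    intro b ps1 hall hL h1 hf ihf
    rw [loopA]
    rw [List.append_nil] at hall
    refine (map_id_of rowB b (fun r hr => rowB_id r (hL r hr) ?_)).symm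
    exact okR_of_noTrig (fun q hq => h1 q (by rw [← hall]; exact hq)) hr
  | cons q ps2 ih =>
    intro b ps1 hall hL h1 hf ihf
    obtain ⟨i, j⟩ := q
    have hstep : ∀ l, getCell b i j = "+" → getCell b i (j + 1) = l → (l = "O" ∨ l = "X") →
        j ≠ (b.getD i []).length - 1 →
        loopA f (fillA f (setCell b i j l)) ps2 = b.map rowB := by
      intro l hplus hnext hl hj
      have hlt : plusTotal (setCell b i j l) < plusTotal b := plusTotal_set_lt hplus hl
      rw [ihf _ (by omega), mapB_setCell (by
        obtain ⟨hi, _⟩ := getCell_lt hplus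
        rw [List.getD_eq_getElem b [] hi]
        exact hL _ (List.getElem_mem hi)) hplus hnext hl hj]
      apply loopA_stable
      intro r hr
      rw [List.mem_map] at hr
      obtain ⟨x, _, rfl⟩ := hr
      exact rowB_stable x
    have hnext_ps1 : ∀ hTrigFalse : ¬ Trig b (i, j),
        (∀ q ∈ ps1 ++ [(i, j)], ¬ Trig b q) := by
      intro hTrigFalse q hq
      rw [List.mem_append] at hq
      rcases hq with hq | hq
      · exact h1 q hq
      · rw [List.mem_singleton] at hq
        subst hq
        exact hTrigFalse
    have hall' : allPairs b = (ps1 ++ [(i, j)]) ++ ps2 := by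
      rw [hall]
      simp
    rw [loopA]
    by_cases hj : j ≠ (b.getD i []).length - 1
    · rw [if_pos hj]
      by_cases c1 : getCell b i j = "+" ∧ getCell b i (j + 1) = "O"
      · rw [if_pos c1]
        exact hstep "O" c1.1 c1.2 (Or.inl rfl) hj
      · rw [if_neg c1]
        by_cases c2 : getCell b i j = "+" ∧ getCell b i (j + 1) = "X"
        · rw [if_pos c2]
          exact hstep "X" c2.1 c2.2 (Or.inr rfl) hj
        · rw [if_neg c2]
          apply ih b (ps1 ++ [(i, j)]) hall' hL _ hf ihf
          apply hnext_ps1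
          intro ⟨ht1, ht2, ht3⟩
          rcases ht3 with h3 | h3
          · exact c1 ⟨ht2, h3⟩
          · exact c2 ⟨ht2, h3⟩
    · rw [if_neg hj]
      apply ih b (ps1 ++ [(i, j)]) hall' hL _ hf ihf
      apply hnext_ps1
      intro ⟨ht1, _⟩
      exact hj ht1

theorem countP_sweep_le (p : String) (r : List String) :
    (sweep p r).countP (fun c => decide (c = "+")) ≤ r.countP (fun c => decide (c = "+")) := by
  induction r generalizing p with
  | nil => simp [sweep]
  | cons a t ih =>
    rw [sweep_cons, List.countP_cons, List.countP_cons]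
    have := ih (fillc p a)
    rcases fillc_eq_prev_or_self p a with h | h
    · by_cases hfa : fillc p a = "+"
      · rw [hfa] at this ⊢
        have : a = "+" := fillc_plus hfa
        simp [this] at *
        omega
      · simp [hfa]
        split <;> omega
    · rw [h] at this
      rw [h]
      omega

theorem plusTotal_pass1_le (b : List (List String)) : plusTotal (pass1 b) ≤ plusTotal b := by
  induction b with
  | nil => simp [pass1, plusTotal]
  | cons r t ih =>
    simp only [pass1, List.map_cons, plusTotal, List.sum_cons] at ih ⊢
    have : plusCountRow (pass1Row r) ≤ plusCountRow r := by
      rw [pass1Row_sweep]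
      exact countP_sweep_le "" r
    omega

theorem fillA_eq (f : Nat) : ∀ b, plusTotal b < f → fillA f b = b.map rowB := by
  induction f with
  | zero => intro b h; omega
  | succ f ih =>
    intro b hb
    rw [fillA]
    show loopA f (pass1 b) (allPairs (pass1 b)) = b.map rowB
    have h1 : loopA f (pass1 b) (allPairs (pass1 b)) = (pass1 b).map rowB := by
      apply la_main f (allPairs (pass1 b)) (pass1 b) [] (by simp) _ (by simp) _ ih
      · intro r hr
        rw [pass1, List.mem_map] at hr
        obtain ⟨x, _, rfl⟩ := hr
        rw [pass1Row_sweep]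
        exact chainL_sweep "" x
      · have := plusTotal_pass1_le b
        omega
    rw [h1, pass1, List.map_map]
    apply List.map_congr_left
    intro x _
    show rowB (pass1Row x) = rowB x
    rw [pass1Row_sweep, rowB_sweep]

-- ===== VERDICT (by name: the statement is the Claim_ definition above) =====
theorem fill_board_spec : Claim_equal_fill_board := by
  intro b _
  show fill_board b = fill_board_alt b
  rw [fill_board, fillA_eq (plusTotal b + 1) b (Nat.lt_succ_self _)]
  rfl
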